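-- pv_equiv track=rewrite | github.com/Sunil-Hegde/AdventOfCode | 2016/day7/day7.py | find_bab_in_hypernets
-- ===== SOURCE A (Python) =====
-- def find_bab_in_hypernets(aba_patterns, hypernets):
--     bab_patterns = {aba[1] + aba[0] + aba[1] for aba in aba_patterns}
--     for hypernet in hypernets:
--         for i in range(len(hypernet) - 2):
--             if hypernet[i] != hypernet[i + 1] and hypernet[i] == hypernet[i + 2]:
--                 bab = hypernet[i:i+3]
--                 if bab in bab_patterns:
--                     return True
--     return False
-- ===== SOURCE B (Python) =====
-- def find_bab_in_hypernets(aba_patterns, hypernets):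
--     # Direct substring search: a BAB window matching bab exists iff the 3-char
--     # string bab occurs in a hypernet (the window shape is automatic when
--     # aba[0] != aba[1]; patterns with aba[0] == aba[1] can never match).
--     for aba in aba_patterns:
--         a, b = aba[0], aba[1]
--         if a != b:
--             bab = b + a + b
--             for hypernet in hypernets:
--                 if bab in hypernet:
--                     return True
--     return False
-- ===== Notes on version B (the rewrite author's own statement) =====
-- stated objective: faster
-- what changed: B drops the set and the explicit window scan entirely: for each aba with aba[0] != aba[1] it builds bab once and tests plain substring containment 'bab in hypernet', correct because a BAB-shaped window equal to bab is exactly a substring occurrence of bab when its two characters differ, and a pattern with equal characters can never match A's window guard.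
import Mathlib
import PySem

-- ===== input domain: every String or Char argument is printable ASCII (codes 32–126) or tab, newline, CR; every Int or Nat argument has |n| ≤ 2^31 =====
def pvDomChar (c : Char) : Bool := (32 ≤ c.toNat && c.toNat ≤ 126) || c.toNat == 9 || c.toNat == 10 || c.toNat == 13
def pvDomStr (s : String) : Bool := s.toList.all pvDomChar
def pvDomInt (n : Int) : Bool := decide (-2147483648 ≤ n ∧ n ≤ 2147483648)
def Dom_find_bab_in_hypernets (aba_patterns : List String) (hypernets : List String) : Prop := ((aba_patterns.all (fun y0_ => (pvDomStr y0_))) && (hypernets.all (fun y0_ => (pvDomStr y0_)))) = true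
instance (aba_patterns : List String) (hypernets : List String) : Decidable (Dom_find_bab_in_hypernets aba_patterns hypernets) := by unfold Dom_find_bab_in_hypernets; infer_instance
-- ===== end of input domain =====

-- B replaces A's set-of-babs + indexed window scan by direct substring search ('bab in hypernet'), skipping patterns whose two characters are equal; alternative algorithm, same observable result.


-- ===== PORT A =====
-- aba[1] + aba[0] + aba[1]  (under Pre_, aba has length ≥ 2 so both gets succeed; [] is never produced there)
def pyBabA (aba : List Char) : List Char :=
  match PySem.List.pyGet? aba 1, PySem.List.pyGet? aba 0 with
  | some b, some a => [b, a, b]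
  | _, _ => []

-- inner 'for i in range(len(hypernet) - 2)': early return True on a matching window present in bab_patterns
def scanA (bset : PySem.Set (List Char)) (c : List Char) : List Int → Bool
  | [] => false
  | i :: rest =>
      if PySem.List.pyGetD c i ' ' ≠ PySem.List.pyGetD c (i + 1) ' ' ∧
         PySem.List.pyGetD c i ' ' = PySem.List.pyGetD c (i + 2) ' ' then
        if PySem.Set.contains bset (PySem.List.slice c (some i) (some (i + 3))) then true
        else scanA bset c rest
      else scanA bset c rest

-- outer 'for hypernet in hypernets'
def loopA (bset : PySem.Set (List Char)) : List String → Bool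
  | [] => false
  | h :: rest =>
      if scanA bset h.toList (PySem.List.pyRange 0 ((h.toList.length : Int) - 2) 1) then true
      else loopA bset rest

def find_bab_in_hypernets (aba_patterns : List String) (hypernets : List String) : Bool :=
  let bab_patterns : PySem.Set (List Char) :=
    PySem.Set.ofList (aba_patterns.map (fun aba => pyBabA aba.toList))
  loopA bab_patterns hypernets

-- ===== PORT B =====
-- inner 'for hypernet in hypernets: if bab in hypernet: return True'
def searchHypsB (bab : List Char) : List String → Bool
  | [] => false
  | h :: rest =>
      if PySem.Chars.isIn bab h.toList then true else searchHypsB bab rest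

-- outer 'for aba in aba_patterns', skipping aba[0] == aba[1]
def loopPatternsB (hypernets : List String) : List String → Bool
  | [] => false
  | aba :: rest =>
      let a := PySem.List.pyGetD aba.toList 0 ' '
      let b := PySem.List.pyGetD aba.toList 1 ' '
      if a ≠ b then
        if searchHypsB [b, a, b] hypernets then true else loopPatternsB hypernets rest
      else loopPatternsB hypernets rest

def find_bab_in_hypernets_alt (aba_patterns : List String) (hypernets : List String) : Bool :=
  loopPatternsB hypernets aba_patterns

-- ===== PRECONDITION & SPEC =====
-- Pre_ excludes exactly the inputs where both A and B raise IndexError: some aba pattern shorter than 2 characters.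
def Pre_find_bab_in_hypernets (aba_patterns : List String) (hypernets : List String) : Prop :=
  ∀ s ∈ aba_patterns, 2 ≤ s.toList.length
instance (aba_patterns : List String) (hypernets : List String) : Decidable (Pre_find_bab_in_hypernets aba_patterns hypernets) := by unfold Pre_find_bab_in_hypernets; infer_instance

def pvWitness_find_bab_in_hypernets : List String × List String := (["aba", "xyx"], ["zz", "babab"])

def Spec_find_bab_in_hypernets (aba_patterns : List String) (hypernets : List String) (out : Bool) : Prop := out = find_bab_in_hypernets_alt aba_patterns hypernets
instance (aba_patterns : List String) (hypernets : List String) (out : Bool) : Decidable (Spec_find_bab_in_hypernets aba_patterns hypernets out) := by unfold Spec_find_bab_in_hypernets; infer_instance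

-- ===== CLAIM (what is proved, stated in full; the proofs are below) =====
def Claim_equal_find_bab_in_hypernets : Prop := ∀ (aba_patterns : List String) (hypernets : List String), Dom_find_bab_in_hypernets aba_patterns hypernets → Pre_find_bab_in_hypernets aba_patterns hypernets → Spec_find_bab_in_hypernets aba_patterns hypernets (find_bab_in_hypernets aba_patterns hypernets)

-- ===== LEMMAS AND PROOFS =====

-- the window condition A tests
def winCond (c : List Char) (i : Int) : Prop :=
  PySem.List.pyGetD c i ' ' ≠ PySem.List.pyGetD c (i + 1) ' ' ∧
  PySem.List.pyGetD c i ' ' = PySem.List.pyGetD c (i + 2) ' '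

theorem scanA_eq_true (bset : PySem.Set (List Char)) (c : List Char) (is : List Int) :
    scanA bset c is = true ↔
      ∃ i ∈ is, winCond c i ∧ PySem.List.slice c (some i) (some (i + 3)) ∈ bset := by
  induction is with
  | nil => simp [scanA]
  | cons i rest ih =>
      simp only [scanA, winCond, List.mem_cons]
      split_ifs with h1 h2
      · simp only [PySem.Set.contains_iff] at h2
        constructor
        · intro _; exact ⟨i, Or.inl rfl, h1, h2⟩
        · intro _; rfl
      · rw [ih]
        constructor
        · rintro ⟨j, hj, hc, hm⟩; exact ⟨j, Or.inr hj, hc, hm⟩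
        · rintro ⟨j, hj, hc, hm⟩
          rcases hj with rfl | hj
          · exact absurd ((PySem.Set.contains_iff _ _).mpr hm) (by simpa using h2)
          · exact ⟨j, hj, hc, hm⟩
      · rw [ih]
        constructor
        · rintro ⟨j, hj, hc, hm⟩; exact ⟨j, Or.inr hj, hc, hm⟩
        · rintro ⟨j, hj, hc, hm⟩
          rcases hj with rfl | hj
          · exact absurd hc h1
          · exact ⟨j, hj, hc, hm⟩

theorem loopA_eq_true (bset : PySem.Set (List Char)) (hs : List String) :
    loopA bset hs = true ↔
      ∃ h ∈ hs, scanA bset h.toList (PySem.List.pyRange 0 ((h.toList.length : Int) - 2) 1) = true := by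
  induction hs with
  | nil => simp [loopA]
  | cons h rest ih =>
      simp only [loopA]
      split_ifs with hh
      · simp only [List.mem_cons]
        exact ⟨fun _ => ⟨h, Or.inl rfl, hh⟩, fun _ => by trivial⟩
      · rw [ih]
        simp only [List.mem_cons]
        constructor
        · rintro ⟨g, hg, hs⟩; exact ⟨g, Or.inr hg, hs⟩
        · rintro ⟨g, hg, hs⟩
          rcases hg with rfl | hg
          · exact absurd hs (by simpa using hh)
          · exact ⟨g, hg, hs⟩

theorem searchHypsB_eq_true (bab : List Char) (hs : List String) :
    searchHypsB bab hs = true ↔ ∃ h ∈ hs, PySem.Chars.isIn bab h.toList = true := by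
  induction hs with
  | nil => simp [searchHypsB]
  | cons h rest ih =>
      simp only [searchHypsB]
      split_ifs with hh
      · simp only [List.mem_cons]
        exact ⟨fun _ => ⟨h, Or.inl rfl, hh⟩, fun _ => by trivial⟩
      · rw [ih]
        simp only [List.mem_cons]
        constructor
        · rintro ⟨g, hg, hm⟩; exact ⟨g, Or.inr hg, hm⟩
        · rintro ⟨g, hg, hm⟩
          rcases hg with rfl | hg
          · exact absurd hm (by simpa using hh)
          · exact ⟨g, hg, hm⟩

theorem loopPatternsB_eq_true (hyps : List String) (ps : List String) :
    loopPatternsB hyps ps = true ↔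
      ∃ aba ∈ ps,
        PySem.List.pyGetD aba.toList 0 ' ' ≠ PySem.List.pyGetD aba.toList 1 ' ' ∧
        searchHypsB [PySem.List.pyGetD aba.toList 1 ' ', PySem.List.pyGetD aba.toList 0 ' ',
                     PySem.List.pyGetD aba.toList 1 ' '] hyps = true := by
  induction ps with
  | nil => simp [loopPatternsB]
  | cons aba rest ih =>
      simp only [loopPatternsB]
      split_ifs with h1 h2
      · simp only [List.mem_cons]
        exact ⟨fun _ => ⟨aba, Or.inl rfl, h1, h2⟩, fun _ => by trivial⟩
      · rw [ih]
        simp only [List.mem_cons]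
        constructor
        · rintro ⟨g, hg, hm⟩; exact ⟨g, Or.inr hg, hm⟩
        · rintro ⟨g, hg, hne, hm⟩
          rcases hg with rfl | hg
          · exact absurd hm (by simpa using h2)
          · exact ⟨g, hg, hne, hm⟩
      · rw [ih]
        constructor
        · rintro ⟨g, hg, hm⟩; exact ⟨g, List.mem_cons_of_mem _ hg, hm⟩
        · rintro ⟨g, hg, hne, hm⟩
          rcases List.mem_cons.mp hg with rfl | hg
          · exact absurd hne h1
          · exact ⟨g, hg, hne, hm⟩

-- under Pre_, pyBabA is the literal [b, a, b]
theorem pyBabA_eq (l : List Char) (h : 2 ≤ l.length) :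
    pyBabA l = [PySem.List.pyGetD l 1 ' ', PySem.List.pyGetD l 0 ' ', PySem.List.pyGetD l 1 ' '] := by
  match l, h with
  | a :: b :: rest, _ =>
      simp [pyBabA, PySem.List.pyGet?, PySem.List.pyIdx?, PySem.List.pyGetD,
            show (0:Int) ≤ (rest.length : Int) + 1 from by omega]

-- a window of A that matches [b,a,b] forces b ≠ a, and is exactly a substring occurrence of [b,a,b]
theorem slice_window (c : List Char) (i : Int) (hi : i ∈ PySem.List.pyRange 0 ((c.length : Int) - 2) 1)
    (x y z : Char) (hs : PySem.List.slice c (some i) (some (i + 3)) = [x, y, z]) :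
    PySem.List.pyGetD c i ' ' = x ∧ PySem.List.pyGetD c (i + 1) ' ' = y ∧
    PySem.List.pyGetD c (i + 2) ' ' = z := by
  rw [PySem.List.mem_pyRange_one] at hi
  obtain ⟨hi0, hilt⟩ := hi
  rw [PySem.List.slice_toNat _ hi0 (by omega)] at hs
  have h3 : (i + 3).toNat - i.toNat = 3 := by omega
  rw [h3] at hs
  have g0 : getElem? c i.toNat = some x := by
    have := congrArg (fun l => l[0]?) hs
    simpa [List.getElem?_take, List.getElem?_drop] using this
  have g1 : getElem? c (i.toNat + 1) = some y := by
    have := congrArg (fun l => l[1]?) hs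
    simpa [List.getElem?_take, List.getElem?_drop] using this
  have g2 : getElem? c (i.toNat + 2) = some z := by
    have := congrArg (fun l => l[2]?) hs
    simpa [List.getElem?_take, List.getElem?_drop] using this
  have e0 : i = ((i.toNat : Nat) : Int) := by omega
  have e1 : i + 1 = (((i.toNat + 1 : Nat)) : Int) := by omega
  have e2 : i + 2 = (((i.toNat + 2 : Nat)) : Int) := by omega
  refine ⟨?_, ?_, ?_⟩
  · rw [e0, PySem.List.pyGetD_natCast]
    simp [List.getD_eq_getElem?_getD, g0]
  · rw [e1, PySem.List.pyGetD_natCast]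
    simp [List.getD_eq_getElem?_getD, g1]
  · rw [e2, PySem.List.pyGetD_natCast]
    simp [List.getD_eq_getElem?_getD, g2]

-- the bridge: for b ≠ a, an A-window equal to [b,a,b] exists iff [b,a,b] is a substring
theorem window_iff_infix (c : List Char) (a b : Char) (hab : b ≠ a) :
    (∃ i ∈ PySem.List.pyRange 0 ((c.length : Int) - 2) 1,
        winCond c i ∧ PySem.List.slice c (some i) (some (i + 3)) = [b, a, b]) ↔
      [b, a, b] <:+: c := by
  constructor
  · rintro ⟨i, hi, _, hs⟩
    rw [PySem.List.mem_pyRange_one] at hi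
    obtain ⟨hi0, hilt⟩ := hi
    rw [PySem.List.slice_toNat _ hi0 (by omega)] at hs
    have h3 : (i + 3).toNat - i.toNat = 3 := by omega
    rw [h3] at hs
    exact hs ▸ (List.take_prefix 3 (c.drop i.toNat)).isInfix.trans (c.drop_suffix i.toNat).isInfix
  · rintro ⟨s, t, hc⟩
    have hc' : c = s ++ ([b, a, b] ++ t) := by rw [← hc]; simp
    have hlen : c.length = s.length + 3 + t.length := by simp [hc']; omega
    have hmem : (s.length : Int) ∈ PySem.List.pyRange 0 ((c.length : Int) - 2) 1 := by
      rw [PySem.List.mem_pyRange_one]; omega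
    have hsl : PySem.List.slice c (some (s.length : Int)) (some ((s.length : Int) + 3)) = [b, a, b] := by
      rw [PySem.List.slice_toNat _ (by omega) (by omega)]
      have h3 : ((s.length : Int) + 3).toNat - ((s.length : Int)).toNat = 3 := by omega
      rw [h3, Int.toNat_natCast, hc', List.drop_left]
      rfl
    have hw := slice_window c (s.length : Int) hmem b a b hsl
    exact ⟨(s.length : Int), hmem, ⟨by rw [hw.1, hw.2.1]; exact hab, by rw [hw.1, hw.2.2]⟩, hsl⟩

-- ===== VERDICT (by name: the statement is the Claim_ definition above) =====
theorem find_bab_in_hypernets_spec : Claim_equal_find_bab_in_hypernets := by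
  intro aba_patterns hypernets _ hpre
  unfold Spec_find_bab_in_hypernets find_bab_in_hypernets find_bab_in_hypernets_alt
  simp only []
  apply Bool.eq_iff_iff.mpr
  rw [loopA_eq_true, loopPatternsB_eq_true]
  constructor
  · rintro ⟨h, hh, hsc⟩
    rw [scanA_eq_true] at hsc
    rcases hsc with ⟨i, hi, hc, hm⟩
    rw [PySem.Set.mem_ofList, List.mem_map] at hm
    rcases hm with ⟨aba, ha, hb⟩
    rw [pyBabA_eq aba.toList (hpre aba ha)] at hb
    set a := PySem.List.pyGetD aba.toList 0 ' '
    set b := PySem.List.pyGetD aba.toList 1 ' '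
    have hw := slice_window h.toList i hi b a b hb.symm
    have hne : a ≠ b := by
      intro he
      exact hc.1 (by rw [hw.1, hw.2.1]; exact he.symm)
    refine ⟨aba, ha, hne, ?_⟩
    rw [searchHypsB_eq_true]
    refine ⟨h, hh, ?_⟩
    rw [PySem.Chars.isIn_iff_infix]
    exact (window_iff_infix h.toList a b (fun he => hne he.symm)).mp ⟨i, hi, hc, hb.symm⟩
  · rintro ⟨aba, ha, hne, hm⟩
    rw [searchHypsB_eq_true] at hm
    rcases hm with ⟨h, hh, hin⟩
    rw [PySem.Chars.isIn_iff_infix] at hin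
    set a := PySem.List.pyGetD aba.toList 0 ' '
    set b := PySem.List.pyGetD aba.toList 1 ' '
    rcases (window_iff_infix h.toList a b (fun he => hne he.symm)).mpr hin with ⟨i, hi, hc, hs⟩
    refine ⟨h, hh, ?_⟩
    rw [scanA_eq_true]
    refine ⟨i, hi, hc, ?_⟩
    rw [PySem.Set.mem_ofList, List.mem_map]
    exact ⟨aba, ha, by rw [pyBabA_eq aba.toList (hpre aba ha), hs]⟩
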